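-- pv_equiv track=rewrite | github.com/bszlacht/TableStructureRecognition | server/model/BorderlessTableCellRecognizer.py | y_lines_based_on_rows_boundaries
-- ===== SOURCE A (Python) =====
-- def y_lines_based_on_rows_boundaries(table, rows_top_btm):
--     y_lines = [table[1]]
--     prev_values, previous_line = None, None
--
--     for i in range(len(rows_top_btm) - 1):
--         if i == 0 and prev_values is None:
--             prev_values = rows_top_btm[i]
--         else:
--             new_potential_line = (rows_top_btm[i][0] + prev_values[1]) // 2  # mean of min y curr_row and max y prev_row
--
--             if previous_line is not None:
--                 if abs(new_potential_line - previous_line) <= 10: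
--                     y_lines.pop()
--
--             y_lines.append(new_potential_line)
--             previous_line = new_potential_line
--             prev_values = rows_top_btm[i]
--
--     y_lines.append(table[3])
--     return y_lines
-- ===== SOURCE B (Python) =====
-- def y_lines_based_on_rows_boundaries(table, rows_top_btm):
--     # midpoints between consecutive rows (rows 1..n-2 paired with their predecessor)
--     mids = [(nxt[0] + prv[1]) // 2 for prv, nxt in zip(rows_top_btm, rows_top_btm[1:-1])]
--     # closed-form merge: a midpoint survives iff the NEXT midpoint is more than 10
--     # away; the last midpoint always survives (mids[-1:] is [] when there are none)
--     kept = [m for m, nxt in zip(mids, mids[1:]) if abs(nxt - m) > 10] + mids[-1:]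
--     return [table[1]] + kept + [table[3]]
-- ===== Notes on version B (the rewrite author's own statement) =====
-- stated objective: simpler
-- what changed: Replaces A's stateful single loop with pop-based merging by a closed-form characterisation: compute all consecutive-row midpoints with zip, then keep a midpoint iff the next midpoint is more than 10 away (the last always survives) via a look-ahead zip filter; no mutable merge state at all.
import Mathlib
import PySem

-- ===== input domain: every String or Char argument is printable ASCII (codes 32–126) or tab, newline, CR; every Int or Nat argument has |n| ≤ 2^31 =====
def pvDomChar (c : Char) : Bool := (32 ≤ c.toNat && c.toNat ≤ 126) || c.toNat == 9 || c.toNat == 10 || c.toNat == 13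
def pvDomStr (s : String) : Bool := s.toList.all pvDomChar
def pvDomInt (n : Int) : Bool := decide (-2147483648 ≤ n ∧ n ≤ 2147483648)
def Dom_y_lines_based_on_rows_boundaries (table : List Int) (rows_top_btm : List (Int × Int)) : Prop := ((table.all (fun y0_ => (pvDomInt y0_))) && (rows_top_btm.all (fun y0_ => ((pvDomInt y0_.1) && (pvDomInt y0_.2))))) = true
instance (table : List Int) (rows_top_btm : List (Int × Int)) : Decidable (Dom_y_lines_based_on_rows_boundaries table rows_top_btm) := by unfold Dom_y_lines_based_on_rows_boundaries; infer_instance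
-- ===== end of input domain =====

-- B replaces A's stateful pop-merge loop by a closed-form look-ahead filter:
-- a midpoint is kept iff the next midpoint is more than 10 away (the last always is).


-- ===== PORT A =====
-- loop body of A's for-loop; state = (y_lines, prev_values, previous_line)
def pvAstep (rows_top_btm : List (Int × Int))
    (st : List Int × Option (Int × Int) × Option Int) (i : Int) :
    List Int × Option (Int × Int) × Option Int :=
  let (y_lines, prev_values, previous_line) := st
  if i == 0 && prev_values.isNone then
    (y_lines, some (PySem.List.pyGetD rows_top_btm i (0, 0)), previous_line)
  else
    let new_potential_line :=
      PySem.Int.floordiv ((PySem.List.pyGetD rows_top_btm i (0, 0)).1 + (prev_values.getD (0, 0)).2) 2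
    let y_lines :=
      match previous_line with
      | some pl => if |new_potential_line - pl| ≤ 10 then y_lines.dropLast else y_lines
      | none => y_lines
    (y_lines ++ [new_potential_line], some (PySem.List.pyGetD rows_top_btm i (0, 0)), some new_potential_line)

-- table[1]/table[3]/rows_top_btm[i] ported as pyGetD: exact under Pre_ (every index in range)
def y_lines_based_on_rows_boundaries (table : List Int) (rows_top_btm : List (Int × Int)) : List Int :=
  let st := (PySem.List.pyRange 0 ((rows_top_btm.length : Int) - 1) 1).foldl
    (pvAstep rows_top_btm) ([PySem.List.pyGetD table 1 0], none, none)
  st.1 ++ [PySem.List.pyGetD table 3 0]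

-- ===== PORT B =====
def y_lines_based_on_rows_boundaries_alt (table : List Int) (rows_top_btm : List (Int × Int)) : List Int :=
  let mids := (rows_top_btm.zip (PySem.List.slice rows_top_btm (some 1) (some (-1)))).map
    (fun pc => PySem.Int.floordiv (pc.2.1 + pc.1.2) 2)
  let kept := ((mids.zip (PySem.List.slice mids (some 1) none)).filter
      (fun p => decide (10 < |p.2 - p.1|))).map Prod.fst
    ++ PySem.List.slice mids (some (-1)) none
  [PySem.List.pyGetD table 1 0] ++ kept ++ [PySem.List.pyGetD table 3 0]

-- ===== PRECONDITION & SPEC =====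
-- Python A raises IndexError on table[3] (or table[1]) when table is shorter than 4.
def Pre_y_lines_based_on_rows_boundaries (table : List Int) (rows_top_btm : List (Int × Int)) : Prop :=
  4 ≤ table.length
instance (table : List Int) (rows_top_btm : List (Int × Int)) : Decidable (Pre_y_lines_based_on_rows_boundaries table rows_top_btm) := by unfold Pre_y_lines_based_on_rows_boundaries; infer_instance

def pvWitness_y_lines_based_on_rows_boundaries : List Int × (List (Int × Int)) :=
  ([0, 5, 0, 100], [(10, 20), (30, 40), (32, 60)])

def Spec_y_lines_based_on_rows_boundaries (table : List Int) (rows_top_btm : List (Int × Int)) (out : List Int) : Prop := out = y_lines_based_on_rows_boundaries_alt table rows_top_btm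
instance (table : List Int) (rows_top_btm : List (Int × Int)) (out : List Int) : Decidable (Spec_y_lines_based_on_rows_boundaries table rows_top_btm out) := by unfold Spec_y_lines_based_on_rows_boundaries; infer_instance

-- ===== CLAIM (what is proved, stated in full; the proofs are below) =====
def Claim_equal_y_lines_based_on_rows_boundaries : Prop := ∀ (table : List Int) (rows_top_btm : List (Int × Int)), Dom_y_lines_based_on_rows_boundaries table rows_top_btm → Pre_y_lines_based_on_rows_boundaries table rows_top_btm → Spec_y_lines_based_on_rows_boundaries table rows_top_btm (y_lines_based_on_rows_boundaries table rows_top_btm)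

-- ===== LEMMAS AND PROOFS =====

theorem pvWitness_ok :
    Dom_y_lines_based_on_rows_boundaries pvWitness_y_lines_based_on_rows_boundaries.1 pvWitness_y_lines_based_on_rows_boundaries.2 ∧
    Pre_y_lines_based_on_rows_boundaries pvWitness_y_lines_based_on_rows_boundaries.1 pvWitness_y_lines_based_on_rows_boundaries.2 := by
  constructor <;> decide

-- the sequence of midpoints produced when pv is the previous row and ys the remaining rows
def pvMidsFrom (pv : Int × Int) : List (Int × Int) → List Int
  | [] => []
  | c :: ys => PySem.Int.floordiv (c.1 + pv.2) 2 :: pvMidsFrom c ys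

-- proof-side merge step (A's pop-append behaviour on the kept list)
def pvBstep (st : List Int × Option Int) (m : Int) : List Int × Option Int :=
  let (kept, prev_m) := st
  let kept :=
    match prev_m with
    | some p => if |m - p| ≤ 10 then kept.dropLast else kept
    | none => kept
  (kept ++ [m], some m)

-- closed form of the merge: keep p iff the next midpoint is far; the last survives
def pvKeepFrom (p : Int) : List Int → List Int
  | [] => [p]
  | m :: rest => (if |m - p| ≤ 10 then [] else [p]) ++ pvKeepFrom m rest

def pvKeepAll : List Int → List Int
  | [] => []
  | m :: rest => pvKeepFrom m rest

theorem pv_zip_take_map (f : (Int × Int) × (Int × Int) → Int)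
    (hf : ∀ pc : (Int × Int) × (Int × Int), f pc = PySem.Int.floordiv (pc.2.1 + pc.1.2) 2) :
    ∀ (ys : List (Int × Int)) (p : Int × Int) (m : Nat),
      (((p :: ys).zip (ys.take m)).map f) = pvMidsFrom p (ys.take m) := by
  intro ys
  induction ys with
  | nil => intro p m; simp [pvMidsFrom]
  | cons y ys ih =>
    intro p m
    cases m with
    | zero => simp [pvMidsFrom]
    | succ m' =>
      simp only [List.take_succ_cons, List.zip_cons_cons, List.map_cons, pvMidsFrom, hf]
      exact congrArg _ (ih y m')

theorem pv_slice_one_neg_one (xs : List (Int × Int)) :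
    PySem.List.slice xs (some 1) (some (-1)) = xs.tail.dropLast := by
  cases xs with
  | nil => rfl
  | cons x xs =>
    have h : ¬((xs.length : Int) < 0) := by omega
    simp [PySem.List.slice, PySem.List.clampIdx, List.dropLast_eq_take, h]

-- merge fold with a last-kept element p equals kept ++ closed form
theorem pv_merge_from :
    ∀ (ms kept : List Int) (p : Int),
      (ms.foldl pvBstep (kept ++ [p], some p)).1 = kept ++ pvKeepFrom p ms := by
  intro ms
  induction ms with
  | nil => intro kept p; simp [pvKeepFrom]
  | cons m rest ih =>
    intro kept p
    have hstep : pvBstep (kept ++ [p], some p) m =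
        ((if |m - p| ≤ 10 then kept else kept ++ [p]) ++ [m], some m) := by
      simp [pvBstep]
    rw [List.foldl_cons, hstep]
    by_cases h : |m - p| ≤ 10
    · simp [h, ih kept m, pvKeepFrom]
    · rw [if_neg h]
      rw [ih (kept ++ [p]) m]
      simp [pvKeepFrom, h]

theorem pv_merge_all (ms : List Int) :
    (ms.foldl pvBstep ([], none)).1 = pvKeepAll ms := by
  cases ms with
  | nil => rfl
  | cons m rest =>
    have h : pvBstep ([], none) m = ([] ++ [m], some m) := by simp [pvBstep]
    rw [List.foldl_cons, h, pv_merge_from]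
    simp [pvKeepAll]

-- B's look-ahead zip filter equals the same closed form
theorem pv_filter_keep :
    ∀ ms : List Int,
      (((ms.zip (PySem.List.slice ms (some 1) none)).filter
          (fun p => decide (10 < |p.2 - p.1|))).map Prod.fst)
        ++ PySem.List.slice ms (some (-1)) none = pvKeepAll ms := by
  intro ms
  induction ms with
  | nil => rfl
  | cons p rest ih =>
    cases rest with
    | nil => simp [PySem.List.slice_from_one, PySem.List.slice_from_neg_one, pvKeepAll, pvKeepFrom]
    | cons m rest' =>
      have hlast : PySem.List.slice (p :: m :: rest') (some (-1)) none =
          PySem.List.slice (m :: rest') (some (-1)) none := by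
        rw [PySem.List.slice_from_neg_one, PySem.List.slice_from_neg_one]
        simp
      rw [PySem.List.slice_from_one] at ih ⊢
      simp only [List.tail_cons, List.zip_cons_cons, List.filter_cons, hlast]
      by_cases h : |m - p| ≤ 10
      · have h' : ¬(10 < |m - p|) := by omega
        simp only [h', decide_false, pvKeepAll, pvKeepFrom, if_pos h]
        simpa [pvKeepAll] using ih
      · have h' : 10 < |m - p| := by omega
        simp only [h', decide_true, pvKeepAll, pvKeepFrom, if_neg h]
        simp only [List.cons_append]
        simpa [pvKeepAll] using ih

-- core correspondence: A's else-branch step (as the pure function pvG) folded over the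
-- remaining rows equals the merge fold over the corresponding midpoints
def pvG (st : List Int × Option (Int × Int) × Option Int) (v : Int × Int) :
    List Int × Option (Int × Int) × Option Int :=
  let m := PySem.Int.floordiv (v.1 + (st.2.1.getD (0, 0)).2) 2
  ((match st.2.2 with
    | some pl => if |m - pl| ≤ 10 then st.1.dropLast else st.1
    | none => st.1) ++ [m], some v, some m)

theorem pv_core :
    ∀ (ys : List (Int × Int)) (pv : Int × Int) (kept : List Int) (pl : Option Int) (t1 : Int),
      (pl.isSome → kept ≠ []) →
      ys.foldl pvG (t1 :: kept, some pv, pl) =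
        (t1 :: ((pvMidsFrom pv ys).foldl pvBstep (kept, pl)).1,
         some (ys.getLastD pv),
         ((pvMidsFrom pv ys).foldl pvBstep (kept, pl)).2) := by
  intro ys
  induction ys with
  | nil => intro pv kept pl t1 _; simp [pvMidsFrom]
  | cons c ys ih =>
    intro pv kept pl t1 hinv
    have hstep : pvG (t1 :: kept, some pv, pl) c =
        (t1 :: (pvBstep (kept, pl) (PySem.Int.floordiv (c.1 + pv.2) 2)).1, some c,
         some (PySem.Int.floordiv (c.1 + pv.2) 2)) := by
      cases pl with
      | none => simp [pvG, pvBstep]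
      | some p =>
        have hk : kept ≠ [] := hinv (by simp)
        simp [pvG, pvBstep]
        split_ifs <;> simp [List.dropLast_cons_of_ne_nil hk]
    have hinv' : (some (PySem.Int.floordiv (c.1 + pv.2) 2)).isSome →
        (pvBstep (kept, pl) (PySem.Int.floordiv (c.1 + pv.2) 2)).1 ≠ [] := by
      intro _; simp [pvBstep]
    rw [List.foldl_cons, hstep,
        ih c (pvBstep (kept, pl) (PySem.Int.floordiv (c.1 + pv.2) 2)).1
          (some (PySem.Int.floordiv (c.1 + pv.2) 2)) t1 hinv']
    have hB : ((pvBstep (kept, pl) (PySem.Int.floordiv (c.1 + pv.2) 2)).1,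
        some (PySem.Int.floordiv (c.1 + pv.2) 2)) =
        pvBstep (kept, pl) (PySem.Int.floordiv (c.1 + pv.2) 2) := by
      simp [pvBstep]
    rw [hB]
    simp [pvMidsFrom]
    cases ys with
    | nil => rfl
    | cons a l => simp [List.getLast?_cons]

-- the indices 1..n-2 map exactly to the rows processed in A's else-branch
theorem pv_range_map (rows : List (Int × Int)) :
    (PySem.List.pyRange 1 ((rows.length : Int) - 1) 1).map
      (fun i => PySem.List.pyGetD rows i (0, 0)) = rows.tail.dropLast := by
  apply List.ext_getElem
  · simp [PySem.List.length_pyRange_one, List.length_dropLast, List.length_tail]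
  · intro k h1 h2
    have hk : k < rows.length - 2 := by
      simp only [List.length_map, PySem.List.length_pyRange_one] at h1
      omega
    have hidx : (PySem.List.pyRange 1 ((rows.length : Int) - 1) 1)[k]'(by simpa [List.length_map] using h1) = 1 + (k : Int) := by
      exact PySem.List.getElem_pyRange_one _ _ _ _
    simp only [List.getElem_map, hidx]
    have h1k : (1 : Int) + (k : Int) = ((k + 1 : Nat) : Int) := by push_cast; ring
    rw [h1k, PySem.List.pyGetD_natCast]
    have hlt : k + 1 < rows.length := by omega
    rw [List.getElem_dropLast, List.getElem_tail]
    exact List.getD_eq_getElem rows (0, 0) hlt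

theorem pv_main (table : List Int) (rows_top_btm : List (Int × Int)) :
    y_lines_based_on_rows_boundaries table rows_top_btm =
      y_lines_based_on_rows_boundaries_alt table rows_top_btm := by
  cases rows_top_btm with
  | nil =>
    simp [y_lines_based_on_rows_boundaries, y_lines_based_on_rows_boundaries_alt,
      PySem.List.slice_from_neg_one,
      PySem.List.pyRange_one_eq_nil (by norm_num : (-1 : Int) ≤ 0)]
  | cons r0 rest =>
    cases rest with
    | nil =>
      simp [y_lines_based_on_rows_boundaries, y_lines_based_on_rows_boundaries_alt,
        pv_slice_one_neg_one, PySem.List.slice_from_neg_one,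
        PySem.List.pyRange_one_eq_nil (by norm_num : (0 : Int) ≤ 0)]
    | cons r1 rest' =>
      set rows := r0 :: r1 :: rest' with hrows
      have hn : (2 : Int) ≤ (rows.length : Int) := by simp [hrows]; omega
      -- split off i = 0
      have hsplit : PySem.List.pyRange 0 ((rows.length : Int) - 1) 1 =
          0 :: PySem.List.pyRange 1 ((rows.length : Int) - 1) 1 := by
        rw [PySem.List.pyRange_one_cons (by omega)]
        norm_num
      have hstep0 : pvAstep rows ([PySem.List.pyGetD table 1 0], none, none) 0 =
          ([PySem.List.pyGetD table 1 0], some r0, none) := by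
        simp [pvAstep, hrows, PySem.List.pyGetD_zero_cons]
      -- on indices ≥ 1 the step is the pure else-branch pvG applied to the indexed row
      have hcongr : (PySem.List.pyRange 1 ((rows.length : Int) - 1) 1).foldl (pvAstep rows)
            ([PySem.List.pyGetD table 1 0], some r0, none) =
          (PySem.List.pyRange 1 ((rows.length : Int) - 1) 1).foldl
            (fun st i => pvG st (PySem.List.pyGetD rows i (0, 0)))
            ([PySem.List.pyGetD table 1 0], some r0, none) := by
        apply PySem.List.foldl_congr_mem
        intro st i hi
        have hi1 : 1 ≤ i := (PySem.List.mem_pyRange_one.mp hi).1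
        have hne : (i == (0 : Int)) = false := by
          simp only [beq_eq_false_iff_ne]; omega
        obtain ⟨yl, pv?, pl?⟩ := st
        simp [pvAstep, pvG, hne]
      have hmap := (@List.foldl_map _ _ _ (fun i : Int => PySem.List.pyGetD rows i (0, 0)) pvG
        (PySem.List.pyRange 1 ((rows.length : Int) - 1) 1)
        ([PySem.List.pyGetD table 1 0], some r0, none)).symm
      rw [y_lines_based_on_rows_boundaries]
      rw [hsplit, List.foldl_cons, hstep0, hcongr, hmap, pv_range_map]
      rw [pv_core rows.tail.dropLast r0 [] none (PySem.List.pyGetD table 1 0) (by simp)]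
      rw [y_lines_based_on_rows_boundaries_alt]
      have hmids : ((rows.zip (PySem.List.slice rows (some 1) (some (-1)))).map
            (fun pc => PySem.Int.floordiv (pc.2.1 + pc.1.2) 2)) =
          pvMidsFrom r0 rows.tail.dropLast := by
        rw [pv_slice_one_neg_one]
        rw [hrows]
        simp only [List.tail_cons]
        rw [List.dropLast_eq_take]
        exact pv_zip_take_map _ (fun pc => rfl) (r1 :: rest') r0 ((r1 :: rest').length - 1)
      rw [hmids, pv_filter_keep, pv_merge_all]
      simp

-- ===== VERDICT (by name: the statement is the Claim_ definition above) =====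
theorem y_lines_based_on_rows_boundaries_spec : Claim_equal_y_lines_based_on_rows_boundaries := by
  intro table rows _ _
  unfold Spec_y_lines_based_on_rows_boundaries
  exact pv_main table rows
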